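-- pv_equiv track=rewrite | github.com/apinanyogaratnam/Image-Compression-Tool | utilities.py | get_list_of_tuple_indexes
-- ===== SOURCE A (Python) =====
-- def get_list_of_tuple_indexes(lst, n_dimension, width):
--     """Returns a list of items with items in their box form
--     """
--
--     lst = lst[:n_dimension]
--     list_of_indexes = []
--     for i in range(n_dimension):
--         current_list_indexes = lst[:n_dimension]
--         for j in range(len(current_list_indexes)):
--             list_of_indexes.append(current_list_indexes[j])
--
--         for k in range(n_dimension):
--             lst[k] += width
--
--     return list_of_indexes
-- ===== SOURCE B (Python) =====
-- def get_list_of_tuple_indexes(lst, n_dimension, width):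
--     """Returns a list of items with items in their box form"""
--     lst = lst[:n_dimension]
--     return [lst[j] + i * width for i in range(n_dimension) for j in range(n_dimension)]
-- ===== Notes on version B (the rewrite author's own statement) =====
-- stated objective: simpler
-- what changed: Replaces A's mutable working list (repeatedly sliced, copied element-by-element into an accumulator, and incremented in place each outer pass) by a single comprehension computing each element by the closed-form offset lst[j] + i*width.
import Mathlib
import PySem

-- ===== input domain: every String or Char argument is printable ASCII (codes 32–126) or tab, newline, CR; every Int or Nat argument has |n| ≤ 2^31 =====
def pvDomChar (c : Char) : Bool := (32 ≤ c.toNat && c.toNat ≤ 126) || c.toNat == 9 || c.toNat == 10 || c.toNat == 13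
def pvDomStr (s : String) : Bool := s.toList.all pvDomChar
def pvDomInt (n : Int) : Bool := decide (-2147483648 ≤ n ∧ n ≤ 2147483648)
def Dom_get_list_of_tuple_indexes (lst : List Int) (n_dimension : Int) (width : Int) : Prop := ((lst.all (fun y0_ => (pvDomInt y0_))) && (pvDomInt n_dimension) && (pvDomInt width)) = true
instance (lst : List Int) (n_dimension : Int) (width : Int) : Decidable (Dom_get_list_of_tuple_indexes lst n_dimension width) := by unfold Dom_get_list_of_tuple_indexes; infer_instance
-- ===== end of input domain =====

-- B replaces A's mutable working list (copied into the accumulator and incremented in place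
-- each outer pass) by one comprehension using the closed-form offset lst[j] + i*width (simpler).


-- ===== PORT A =====
def get_list_of_tuple_indexes (lst : List Int) (n_dimension : Int) (width : Int) : List Int :=
  let lst0 := PySem.List.slice lst none (some n_dimension)      -- lst = lst[:n_dimension]
  let st := (PySem.List.pyRange 0 n_dimension 1).foldl          -- for i in range(n_dimension)
    (fun (st : List Int × List Int) _i =>
      let current := PySem.List.slice st.1 none (some n_dimension)   -- current_list_indexes = lst[:n_dimension]
      let acc := (PySem.List.pyRange 0 (current.length : Int) 1).foldl   -- for j in range(len(...))
        (fun a j => a ++ [PySem.List.pyGetD current j 0]) st.2          -- list_of_indexes.append(...)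
      let lst' := (PySem.List.pyRange 0 n_dimension 1).foldl            -- for k in range(n_dimension)
        (fun l k => PySem.List.pySetD l k (PySem.List.pyGetD l k 0 + width)) st.1   -- lst[k] += width
      (lst', acc))
    (lst0, ([] : List Int))
  st.2

-- ===== PORT B =====
def get_list_of_tuple_indexes_alt (lst : List Int) (n_dimension : Int) (width : Int) : List Int :=
  let l := PySem.List.slice lst none (some n_dimension)         -- lst = lst[:n_dimension]
  (PySem.List.pyRange 0 n_dimension 1).flatMap (fun i =>
    (PySem.List.pyRange 0 n_dimension 1).map (fun j =>
      PySem.List.pyGetD l j 0 + i * width))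

-- ===== PRECONDITION & SPEC =====
-- Pre_ excludes exactly the inputs where A (and B) raise IndexError: 1 ≤ n_dimension with len(lst) < n_dimension.
def Pre_get_list_of_tuple_indexes (lst : List Int) (n_dimension : Int) (width : Int) : Prop :=
  n_dimension ≤ 0 ∨ n_dimension ≤ (lst.length : Int)
instance (lst : List Int) (n_dimension : Int) (width : Int) : Decidable (Pre_get_list_of_tuple_indexes lst n_dimension width) := by unfold Pre_get_list_of_tuple_indexes; infer_instance

def pvWitness_get_list_of_tuple_indexes : List Int × Int × Int := ([3, 1, 4], 2, 10)

def Spec_get_list_of_tuple_indexes (lst : List Int) (n_dimension : Int) (width : Int) (out : List Int) : Prop := out = get_list_of_tuple_indexes_alt lst n_dimension width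
instance (lst : List Int) (n_dimension : Int) (width : Int) (out : List Int) : Decidable (Spec_get_list_of_tuple_indexes lst n_dimension width out) := by unfold Spec_get_list_of_tuple_indexes; infer_instance

-- ===== CLAIM (what is proved, stated in full; the proofs are below) =====
def Claim_equal_get_list_of_tuple_indexes : Prop := ∀ (lst : List Int) (n_dimension : Int) (width : Int), Dom_get_list_of_tuple_indexes lst n_dimension width → Pre_get_list_of_tuple_indexes lst n_dimension width → Spec_get_list_of_tuple_indexes lst n_dimension width (get_list_of_tuple_indexes lst n_dimension width)

-- ===== LEMMAS AND PROOFS =====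

-- The in-place increment loop 'for k: lst[k] += w' maps (· + w) over the list.
theorem pv_setloop (w : Int) : ∀ (l pre : List Int),
    (PySem.List.pyRange (pre.length : Int) ((pre.length : Int) + (l.length : Int)) 1).foldl
      (fun acc k => PySem.List.pySetD acc k (PySem.List.pyGetD acc k 0 + w)) (pre ++ l)
    = pre ++ l.map (· + w) := by
  intro l
  induction l with
  | nil => intro pre; simp [PySem.List.pyRange_one_eq_nil]
  | cons x xs ih =>
    intro pre
    rw [PySem.List.pyRange_one_cons (by simp only [List.length_cons]; push_cast; omega)]
    simp only [List.foldl_cons]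
    have hget : PySem.List.pyGetD (pre ++ x :: xs) ((pre.length : Nat) : Int) 0 = x := by
      simp [PySem.List.pyGetD_natCast, List.getD_eq_getElem?_getD, List.getElem?_append_right]
    have hset : PySem.List.pySetD (pre ++ x :: xs) ((pre.length : Nat) : Int) (x + w)
        = (pre ++ [x + w]) ++ xs := by
      simp [PySem.List.pySetD_natCast, List.set_append]
    rw [hget, hset]
    have h3 := ih (pre ++ [x + w])
    simp only [List.length_append, List.length_cons, List.length_nil, List.length_singleton] at h3 ⊢
    have harg2 : ((pre.length : Int)) + (((xs.length + 1 : Nat)) : Int)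
        = (((pre.length + 1 : Nat)) : Int) + (xs.length : Int) := by push_cast; ring
    have harg : ((pre.length : Int) + 1) = (((pre.length + 1 : Nat)) : Int) := by push_cast; ring
    rw [harg2, harg, h3]
    simp

-- m passes of A's outer loop, starting from the sliced list l0 (whose length is n).
theorem pv_outer (n w : Int) (l0 : List Int) (h : (l0.length : Int) = n) (m : Nat) (acc : List Int) :
    ((PySem.List.pyRange 0 (m : Int) 1).foldl
      (fun (st : List Int × List Int) _i =>
        let current := PySem.List.slice st.1 none (some n)
        let acc := (PySem.List.pyRange 0 (current.length : Int) 1).foldl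
          (fun a j => a ++ [PySem.List.pyGetD current j 0]) st.2
        let lst' := (PySem.List.pyRange 0 n 1).foldl
          (fun l k => PySem.List.pySetD l k (PySem.List.pyGetD l k 0 + w)) st.1
        (lst', acc))
      (l0, acc))
    = (l0.map (· + (m : Int) * w),
       acc ++ (List.range m).flatMap (fun (i : Nat) => l0.map (fun x => x + (i : Int) * w))) := by
  induction m generalizing acc with
  | zero => simp [PySem.List.pyRange_one_eq_nil]
  | succ m ih =>
    rw [show (((m + 1 : Nat)) : Int) = (m : Int) + 1 by push_cast; ring,
        PySem.List.pyRange_one_succ_right (by positivity),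
        List.foldl_append, ih]
    simp only [List.foldl_cons, List.foldl_nil]
    have hlen : (l0.map (· + (m : Int) * w)).length = l0.length := by simp
    have hslice : PySem.List.slice (l0.map (· + (m : Int) * w)) none (some n)
        = l0.map (· + (m : Int) * w) := by
      rw [PySem.List.slice_to _ (by omega : (0:Int) ≤ n)]
      apply List.take_of_length_le
      omega
    have hinner : ∀ (cur a : List Int),
        (PySem.List.pyRange 0 (cur.length : Int) 1).foldl
          (fun a j => a ++ [PySem.List.pyGetD cur j 0]) a = a ++ cur := by
      intro cur a
      rw [PySem.List.foldl_append_singleton_eq_map, PySem.List.map_pyGetD_pyRange_zero']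
    have hset : (PySem.List.pyRange 0 n 1).foldl
        (fun l k => PySem.List.pySetD l k (PySem.List.pyGetD l k 0 + w))
        (l0.map (· + (m : Int) * w))
        = (l0.map (· + (m : Int) * w)).map (· + w) := by
      have h4 := pv_setloop w (l0.map (· + (m : Int) * w)) []
      simp only [List.length_nil, List.nil_append, Nat.cast_zero, zero_add, hlen, h] at h4
      exact h4
    simp only [hslice, hinner, hset, Prod.mk.injEq]
    constructor
    · rw [List.map_map]; apply List.map_congr_left; intro x _; simp [Function.comp]; ring
    · rw [List.range_succ, List.flatMap_append]
      simp

theorem get_list_of_tuple_indexes_eq (lst : List Int) (n w : Int)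
    (hpre : Pre_get_list_of_tuple_indexes lst n w) :
    get_list_of_tuple_indexes lst n w = get_list_of_tuple_indexes_alt lst n w := by
  unfold get_list_of_tuple_indexes get_list_of_tuple_indexes_alt
  by_cases hn : n ≤ 0
  · simp [PySem.List.pyRange_one_eq_nil hn]
  · rw [not_le] at hn
    have hlen : n ≤ (lst.length : Int) := by
      rcases hpre with h | h
      · omega
      · exact h
    set l0 := PySem.List.slice lst none (some n) with hl0
    have hl0len : ((l0.length : Nat) : Int) = n := by
      rw [hl0, PySem.List.slice_to _ (by omega : (0:Int) ≤ n)]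
      simp
      omega
    have hm : ((n.toNat : Nat) : Int) = n := by omega
    have hA := pv_outer n w l0 hl0len n.toNat []
    rw [hm] at hA
    simp only [hA, List.nil_append]
    have hB : ∀ i : Int,
        (PySem.List.pyRange 0 n 1).map (fun j => PySem.List.pyGetD l0 j 0 + i * w)
        = l0.map (· + i * w) := by
      intro i
      have h2 := congrArg (List.map (fun y => y + i * w))
        (PySem.List.map_pyGetD_pyRange_zero' (xs := l0) (d := (0:Int)))
      rw [List.map_map] at h2
      rw [← hl0len]
      simpa [Function.comp] using h2
    simp only [hB]
    rw [PySem.List.pyRange_one 0 n, List.flatMap_map]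
    simp

-- ===== VERDICT (by name: the statement is the Claim_ definition above) =====
theorem get_list_of_tuple_indexes_spec : Claim_equal_get_list_of_tuple_indexes := by
  intro lst n w _ hpre
  exact get_list_of_tuple_indexes_eq lst n w hpre
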